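-- pv_equiv track=rewrite | github.com/icoxfog417/muwonder | knowbre/vector_utils.py | make_text_clusters
-- ===== SOURCE A (Python) =====
-- from collections import Counter, defaultdict
-- from functools import reduce
--
-- def __make_text_cluster_key(token):
--     return token.lower().strip()
--
-- def classify_text_tokens(text_tokens, cluster):
--     v = []
--     arranged_tokens = [__make_text_cluster_key(t) for t in text_tokens]
--     for c_i, c_t in enumerate(cluster):
--         if c_t and c_t in arranged_tokens:
--             v.append(1)
--         else:
--             v.append(0)
--
--     return v
--
-- def make_text_clusters(list_of_text_tokens, cluster_count=-1):
--     if not list_of_text_tokens or len(list_of_text_tokens) == 0: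
--         return [], []
--
--     all_tokens = reduce(lambda x, y: x + y, list_of_text_tokens)
--     clusters = Counter()
--     for t in all_tokens:
--         clusters[__make_text_cluster_key(t)] += 1
--
--     chosen_clusters = []
--     if cluster_count < 0:
--         chosen_clusters = clusters.most_common()
--     else:
--         chosen_clusters = clusters.most_common(cluster_count)
--
--     cluster_tokens = [c[0] for c in chosen_clusters]
--     classified_vector = [classify_text_tokens(t, cluster_tokens) for t in list_of_text_tokens]
--
--     return cluster_tokens, classified_vector
-- ===== SOURCE B (Python) =====
-- def make_text_clusters(list_of_text_tokens, cluster_count=-1):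
--     # One pass to count keys; an index dict replaces the per-cluster membership scan.
--     counts = {}
--     for doc in list_of_text_tokens:
--         for t in doc:
--             k = t.lower().strip()
--             counts[k] = counts.get(k, 0) + 1
--     ranked = sorted(counts.items(), key=lambda kv: kv[1], reverse=True)
--     if cluster_count >= 0:
--         ranked = ranked[:cluster_count]
--     cluster_tokens = [k for k, _ in ranked]
--     index = {k: i for i, k in enumerate(cluster_tokens) if k}
--     vectors = []
--     for doc in list_of_text_tokens:
--         v = [0] * len(cluster_tokens)
--         for t in doc:
--             k = t.lower().strip()
--             if k in index:
--                 v[index[k]] = 1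
--         vectors.append(v)
--     return cluster_tokens, vectors
-- ===== Notes on version B (the rewrite author's own statement) =====
-- stated objective: faster
-- what changed: B counts keys in one pass without concatenating the documents and replaces A's per-cluster-token membership scan over each document with a token-to-position index dict and a zero vector filled in a single pass over the document's tokens.
import Mathlib
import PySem

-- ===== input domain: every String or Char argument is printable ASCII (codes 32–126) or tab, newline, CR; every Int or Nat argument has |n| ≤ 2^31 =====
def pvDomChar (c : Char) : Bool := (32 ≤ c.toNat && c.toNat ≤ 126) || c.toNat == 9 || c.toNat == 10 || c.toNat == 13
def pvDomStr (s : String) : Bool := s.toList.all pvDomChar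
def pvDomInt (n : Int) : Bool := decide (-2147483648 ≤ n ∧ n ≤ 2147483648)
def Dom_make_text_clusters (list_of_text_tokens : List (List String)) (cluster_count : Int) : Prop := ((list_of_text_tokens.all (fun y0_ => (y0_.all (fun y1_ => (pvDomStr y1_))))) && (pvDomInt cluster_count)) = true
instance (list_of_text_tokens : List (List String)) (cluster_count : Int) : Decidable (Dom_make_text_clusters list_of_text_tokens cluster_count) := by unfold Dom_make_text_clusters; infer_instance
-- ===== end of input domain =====

-- B replaces A's per-cluster membership scan over each document with a token→position
-- index dict and a zero vector written in one pass over the document's tokens (faster).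

-- ===== PORT A =====
-- __make_text_cluster_key(token) = token.lower().strip()  (shared by both Pythons)
def mkKey (t : String) : String := PySem.Str.strip (PySem.Str.lower t)

-- classify_text_tokens: for each cluster token, 1 iff it is truthy and occurs among the
-- document's arranged tokens (the unused enumerate index is kept, as in the source).
def classify_text_tokens (text_tokens : List String) (cluster : List String) : List Int :=
  let arranged := text_tokens.map mkKey
  (PySem.List.enumerate cluster).foldl
    (fun v p => v ++ [if p.2 ≠ "" ∧ p.2 ∈ arranged then (1 : Int) else 0]) []

def make_text_clusters (list_of_text_tokens : List (List String)) (cluster_count : Int) :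
    List String × List (List Int) :=
  match list_of_text_tokens with
  | [] => ([], [])
  | h :: t =>
    let all_tokens := t.foldl (· ++ ·) h
    let clusters := all_tokens.foldl (fun d tok => d.modify (mkKey tok) 0 (· + 1)) (PySem.Dict.empty : PySem.Dict String Int)
    -- Counter.most_common([n]) = sorted(items, key=count, reverse=True)[:n]
    let chosen_clusters :=
      if cluster_count < 0 then PySem.List.sorted clusters.items (fun c => c.2) true
      else (PySem.List.sorted clusters.items (fun c => c.2) true).take cluster_count.toNat
    let cluster_tokens := chosen_clusters.map (fun c => c.1)
    (cluster_tokens, (h :: t).map (fun tks => classify_text_tokens tks cluster_tokens))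

-- ===== PORT B =====
def make_text_clusters_alt (list_of_text_tokens : List (List String)) (cluster_count : Int) :
    List String × List (List Int) :=
  let counts := list_of_text_tokens.foldl
    (fun d doc => doc.foldl (fun d tok => d.insert (mkKey tok) (d.getD (mkKey tok) 0 + 1)) d)
    (PySem.Dict.empty : PySem.Dict String Int)
  let ranked0 := PySem.List.sorted counts.items (fun kv => kv.2) true
  let ranked := if cluster_count ≥ 0 then PySem.List.slice ranked0 none (some cluster_count) else ranked0
  let cluster_tokens := ranked.map (fun kv => kv.1)
  -- index = {k: i for i, k in enumerate(cluster_tokens) if k}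
  let index := (PySem.List.enumerate cluster_tokens).foldl
    (fun d p => if p.2 = "" then d else d.insert p.2 p.1) (PySem.Dict.empty : PySem.Dict String Int)
  let vectors := list_of_text_tokens.map (fun doc =>
    doc.foldl (fun v tok =>
        match index.get? (mkKey tok) with
        | some i => PySem.List.pySetD v i 1
        | none => v)
      (List.replicate cluster_tokens.length (0 : Int)))
  (cluster_tokens, vectors)

-- ===== PRECONDITION & SPEC =====
def Spec_make_text_clusters (list_of_text_tokens : List (List String)) (cluster_count : Int) (out : List String × List (List Int)) : Prop := out = make_text_clusters_alt list_of_text_tokens cluster_count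
instance (list_of_text_tokens : List (List String)) (cluster_count : Int) (out : List String × List (List Int)) : Decidable (Spec_make_text_clusters list_of_text_tokens cluster_count out) := by unfold Spec_make_text_clusters; infer_instance

-- ===== CLAIM (what is proved, stated in full; the proofs are below) =====
def Claim_equal_make_text_clusters : Prop := ∀ (list_of_text_tokens : List (List String)) (cluster_count : Int), Dom_make_text_clusters list_of_text_tokens cluster_count → Spec_make_text_clusters list_of_text_tokens cluster_count (make_text_clusters list_of_text_tokens cluster_count)

-- ===== LEMMAS AND PROOFS =====

-- reduce(lambda x, y: x + y, l) with first element as seed is flatten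
theorem pv_foldl_append (l : List (List String)) (acc : List String) :
    l.foldl (· ++ ·) acc = acc ++ l.flatten := by
  induction l generalizing acc with
  | nil => simp
  | cons x xs ih => simp [List.foldl_cons, ih, List.append_assoc]

-- a for-loop appending one element per item is map
theorem pv_foldl_append_map {α β : Type} (l : List α) (g : α → β) (acc : List β) :
    l.foldl (fun v x => v ++ [g x]) acc = acc ++ l.map g := by
  induction l generalizing acc with
  | nil => simp
  | cons x xs ih => simp [List.foldl_cons, ih]

theorem pv_classify_eq_map (doc cts : List String) :
    classify_text_tokens doc cts =
      cts.map (fun ct => if ct ≠ "" ∧ ct ∈ doc.map mkKey then (1 : Int) else 0) := by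
  unfold classify_text_tokens
  rw [pv_foldl_append_map]
  simp only [List.nil_append]
  conv_rhs => rw [← PySem.List.map_snd_enumerate (xs := cts) (s := 0)]
  rw [List.map_map]
  rfl

-- both counting loops build Counter((h::t).flatten.map mkKey)
theorem pv_counterA (h : List String) (t : List (List String)) :
    (t.foldl (· ++ ·) h).foldl (fun d tok => d.modify (mkKey tok) 0 (· + 1)) (PySem.Dict.empty : PySem.Dict String Int)
      = PySem.Dict.counter (((h :: t).flatten).map mkKey) := by
  rw [pv_foldl_append, ← List.flatten_cons, PySem.Dict.counter_eq_foldl, List.foldl_map]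

theorem pv_counterB (docs : List (List String)) :
    docs.foldl (fun d doc => doc.foldl
        (fun d tok => d.insert (mkKey tok) (d.getD (mkKey tok) 0 + 1)) d) (PySem.Dict.empty : PySem.Dict String Int)
      = PySem.Dict.counter ((docs.flatten).map mkKey) := by
  have h1 : ∀ (doc : List String) (d : PySem.Dict String Int),
      doc.foldl (fun d tok => d.insert (mkKey tok) (d.getD (mkKey tok) 0 + 1)) d
        = (doc.map mkKey).foldl (fun d k => d.insert k (d.getD k 0 + 1)) d := by
    intro doc d; rw [List.foldl_map]
  calc docs.foldl (fun d doc => doc.foldl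
        (fun d tok => d.insert (mkKey tok) (d.getD (mkKey tok) 0 + 1)) d) (PySem.Dict.empty : PySem.Dict String Int)
      = (docs.map (List.map mkKey)).foldl
          (fun d ks => ks.foldl (fun d k => d.insert k (d.getD k 0 + 1)) d) (PySem.Dict.empty : PySem.Dict String Int) := by
        rw [List.foldl_map]; simp only [h1]
    _ = ((docs.map (List.map mkKey)).flatten).foldl
          (fun d k => d.insert k (d.getD k 0 + 1)) (PySem.Dict.empty : PySem.Dict String Int) := by
        rw [List.foldl_flatten]
    _ = ((docs.flatten).map mkKey).foldl
          (fun d k => d.insert k (d.getD k 0 + 1)) (PySem.Dict.empty : PySem.Dict String Int) := by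
        rw [List.map_flatten]
    _ = PySem.Dict.counter ((docs.flatten).map mkKey) :=
        PySem.Dict.foldl_insert_getD_add_one_eq_counter _

-- the index dict of B: lookup characterisation (skips "", positions are idxOf)
theorem pv_idx_get (cts : List String) (hnd : cts.Nodup) (k : String) (s : Int)
    (d : PySem.Dict String Int) :
    ((PySem.List.enumerate cts s).foldl
        (fun d p => if p.2 = "" then d else d.insert p.2 p.1) d).get? k
      = if k ≠ "" ∧ k ∈ cts then some (s + (cts.idxOf k : Int)) else d.get? k := by
  induction cts generalizing s d with
  | nil => simp [PySem.List.enumerate]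
  | cons c rest ih =>
    rw [PySem.List.enumerate_cons, List.foldl_cons]
    dsimp only
    rcases List.nodup_cons.mp hnd with ⟨hcn, hrest⟩
    by_cases hkc : k = c
    · subst hkc
      by_cases hk0 : k = ""
      · subst hk0
        rw [ih hrest]
        simp
      · rw [ih hrest]
        have : ¬ k ∈ rest := hcn
        simp only [this, and_false, if_false, hk0]
        simp [hk0, PySem.Dict.get?_insert_self]
    · rw [ih hrest]
      have hmem : (k ∈ c :: rest) = (k ∈ rest) := by
        simp [List.mem_cons, hkc]
      by_cases hk : k ≠ "" ∧ k ∈ rest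
      · have : k ≠ "" ∧ k ∈ c :: rest := ⟨hk.1, List.mem_cons_of_mem _ hk.2⟩
        rw [if_pos hk, if_pos this, List.idxOf_cons_ne _ (Ne.symm hkc)]
        push_cast
        ring_nf
      · rw [if_neg hk]
        have hnot : ¬ (k ≠ "" ∧ k ∈ c :: rest) := by
          intro hc
          exact hk ⟨hc.1, by rcases List.mem_cons.mp hc.2 with h | h; exact absurd h hkc; exact h⟩
        rw [if_neg hnot]
        by_cases hc0 : c = ""
        · simp [hc0]
        · rw [if_neg hc0, PySem.Dict.get?_insert_of_ne d s hkc]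

-- length of B's vector loop
theorem pv_vec_length (idx : PySem.Dict String Int) (doc : List String) (v : List Int) :
    (doc.foldl (fun v tok =>
        match idx.get? (mkKey tok) with
        | some i => PySem.List.pySetD v i 1
        | none => v) v).length = v.length := by
  induction doc generalizing v with
  | nil => rfl
  | cons tok rest ih =>
    rw [List.foldl_cons, ih]
    cases idx.get? (mkKey tok) <;> simp [PySem.List.length_pySetD]

-- elementwise value of B's vector loop, for the index dict built from cts
theorem pv_vec_elem (cts : List String) (hnd : cts.Nodup) (doc : List String)
    (v : List Int) (hv : v.length = cts.length) (i : Nat) (hi : i < cts.length) :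
    (doc.foldl (fun v tok =>
        match ((PySem.List.enumerate cts 0).foldl
            (fun d p => if p.2 = "" then d else d.insert p.2 p.1)
            (PySem.Dict.empty : PySem.Dict String Int)).get? (mkKey tok) with
        | some j => PySem.List.pySetD v j 1
        | none => v) v)[i]?
      = if cts[i] ≠ "" ∧ cts[i] ∈ doc.map mkKey then some 1 else v[i]? := by
  induction doc generalizing v with
  | nil => simp
  | cons tok rest ih =>
    rw [List.foldl_cons]
    have hget := pv_idx_get cts hnd (mkKey tok) 0 (PySem.Dict.empty : PySem.Dict String Int)
    by_cases hmem : mkKey tok ≠ "" ∧ mkKey tok ∈ cts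
    · rw [if_pos hmem] at hget
      simp only [zero_add] at hget
      -- d' = pySetD v (idxOf) 1
      have hlt : cts.idxOf (mkKey tok) < cts.length := List.idxOf_lt_length_of_mem hmem.2
      have hset : (match ((PySem.List.enumerate cts 0).foldl
            (fun d p => if p.2 = "" then d else d.insert p.2 p.1)
            (PySem.Dict.empty : PySem.Dict String Int)).get? (mkKey tok) with
          | some j => PySem.List.pySetD v j 1
          | none => v) = v.set (cts.idxOf (mkKey tok)) 1 := by
        rw [hget]
        simp [PySem.List.pySetD_natCast]
      rw [hset, ih _ (by simp [hv])]
      by_cases hrest : cts[i] ≠ "" ∧ cts[i] ∈ rest.map mkKey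
      · rw [if_pos hrest, if_pos ⟨hrest.1, by simp only [List.map_cons, List.mem_cons]; exact Or.inr hrest.2⟩]
      · rw [if_neg hrest]
        by_cases hie : i = cts.idxOf (mkKey tok)
        · subst hie
          have hcts : cts[cts.idxOf (mkKey tok)] = mkKey tok := List.getElem_idxOf hlt
          rw [if_pos ⟨by rw [hcts]; exact hmem.1, by rw [hcts]; simp⟩]
          rw [List.getElem?_set_self (by omega)]
        · rw [List.getElem?_set_ne (fun h => hie h.symm)]
          have : ¬ (cts[i] ≠ "" ∧ cts[i] ∈ (tok :: rest).map mkKey) := by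
            intro hc
            rcases (by simpa using hc.2 :
                cts[i] = mkKey tok ∨ ∃ a ∈ rest, mkKey a = cts[i]) with h | ⟨a, ha, hae⟩
            · have heq : cts[i] = cts[cts.idxOf (mkKey tok)]'hlt := by
                rw [List.getElem_idxOf hlt]; exact h
              exact hie ((List.Nodup.getElem_inj_iff hnd).mp heq)
            · exact hrest ⟨hc.1, List.mem_map.mpr ⟨a, ha, hae⟩⟩
          rw [if_neg this]
    · rw [if_neg hmem] at hget
      have hid : (match ((PySem.List.enumerate cts 0).foldl
            (fun d p => if p.2 = "" then d else d.insert p.2 p.1)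
            (PySem.Dict.empty : PySem.Dict String Int)).get? (mkKey tok) with
          | some j => PySem.List.pySetD v j 1
          | none => v) = v := by rw [hget, PySem.Dict.get?_empty]
      rw [hid, ih v hv]
      have : (cts[i] ≠ "" ∧ cts[i] ∈ (tok :: rest).map mkKey)
          ↔ (cts[i] ≠ "" ∧ cts[i] ∈ rest.map mkKey) := by
        constructor
        · rintro ⟨h1, h2⟩
          rcases (by simpa using h2 :
              cts[i] = mkKey tok ∨ ∃ a ∈ rest, mkKey a = cts[i]) with h | ⟨a, ha, hae⟩
          · exact absurd ⟨by rw [← h]; exact h1, by rw [← h]; exact List.getElem_mem hi⟩ hmem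
          · exact ⟨h1, List.mem_map.mpr ⟨a, ha, hae⟩⟩
        · rintro ⟨h1, h2⟩
          exact ⟨h1, by simp only [List.map_cons, List.mem_cons]; exact Or.inr h2⟩
      by_cases hc : cts[i] ≠ "" ∧ cts[i] ∈ rest.map mkKey
      · rw [if_pos hc, if_pos (this.mpr hc)]
      · rw [if_neg hc, if_neg (fun h => hc (this.mp h))]

-- B's per-document loop computes exactly A's classify_text_tokens
theorem pv_doc_eq (cts : List String) (hnd : cts.Nodup) (doc : List String) :
    doc.foldl (fun v tok =>
        match ((PySem.List.enumerate cts 0).foldl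
            (fun d p => if p.2 = "" then d else d.insert p.2 p.1)
            (PySem.Dict.empty : PySem.Dict String Int)).get? (mkKey tok) with
        | some j => PySem.List.pySetD v j 1
        | none => v) (List.replicate cts.length (0 : Int))
      = classify_text_tokens doc cts := by
  rw [pv_classify_eq_map]
  apply List.ext_getElem?
  intro i
  by_cases hi : i < cts.length
  · rw [pv_vec_elem cts hnd doc _ (by simp) i hi]
    rw [List.getElem?_map, List.getElem?_eq_getElem hi]
    simp only [Option.map_some]
    by_cases hc : cts[i] ≠ "" ∧ cts[i] ∈ doc.map mkKey
    · rw [if_pos hc, if_pos hc]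
    · rw [if_neg hc, if_neg hc, List.getElem?_replicate, if_pos hi]
  · rw [List.getElem?_eq_none, List.getElem?_eq_none]
    · simpa using hi
    · rw [pv_vec_length]; simpa using hi

-- the chosen cluster tokens are pairwise distinct
theorem pv_cts_nodup (K : List String) (n : Nat) :
    (((PySem.List.sorted (PySem.Dict.counter K).items (fun kv => kv.2) true).take n).map
      (fun kv => kv.1)).Nodup := by
  have hperm : (PySem.List.sorted (PySem.Dict.counter K).items (fun kv => kv.2) true).Perm
      (PySem.Dict.counter K).items := PySem.List.sorted_perm _ _ _
  have hkeys : ((PySem.Dict.counter K).items.map (fun kv => kv.1)).Nodup := by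
    have := PySem.Dict.nodup_keys_counter (xs := K)
    simpa [PySem.Dict.keys] using this
  have hall : ((PySem.List.sorted (PySem.Dict.counter K).items (fun kv => kv.2) true).map
      (fun kv => kv.1)).Nodup := ((hperm.map _).nodup_iff).mpr hkeys
  have hsub : (((PySem.List.sorted (PySem.Dict.counter K).items (fun kv => kv.2) true).take n).map
      (fun kv => kv.1)).Sublist ((PySem.List.sorted (PySem.Dict.counter K).items
        (fun kv => kv.2) true).map (fun kv => kv.1)) :=
    (List.take_sublist _ _).map _
  exact hall.sublist hsub

theorem pv_main (docs : List (List String)) (cc : Int) :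
    make_text_clusters docs cc = make_text_clusters_alt docs cc := by
  cases docs with
  | nil =>
    unfold make_text_clusters make_text_clusters_alt
    have hs : PySem.List.sorted ((PySem.Dict.empty : PySem.Dict String Int)).items
        (fun kv : String × Int => kv.2) true = [] :=
      (PySem.List.sorted_eq_nil_iff _ _ _).mpr rfl
    by_cases hcc : cc ≥ 0
    · simp [hcc, hs, PySem.List.slice, PySem.List.clampIdx]
    · simp [hcc, hs]
  | cons h t =>
    unfold make_text_clusters make_text_clusters_alt
    simp only []
    rw [pv_counterA, pv_counterB]
    set K := ((h :: t).flatten).map mkKey with hK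
    -- the chosen lists coincide
    have hchosen :
        (if cc < 0 then PySem.List.sorted (PySem.Dict.counter K).items (fun c => c.2) true
         else (PySem.List.sorted (PySem.Dict.counter K).items (fun c => c.2) true).take cc.toNat)
        = (if cc ≥ 0 then PySem.List.slice
              (PySem.List.sorted (PySem.Dict.counter K).items (fun kv => kv.2) true)
              none (some cc)
           else PySem.List.sorted (PySem.Dict.counter K).items (fun kv => kv.2) true) := by
      by_cases hcc : cc < 0
      · rw [if_pos hcc, if_neg (by omega)]
      · rw [if_neg hcc, if_pos (by omega), PySem.List.slice_to _ (by omega)]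
    rw [hchosen]
    set chosen := (if cc ≥ 0 then PySem.List.slice
        (PySem.List.sorted (PySem.Dict.counter K).items (fun kv => kv.2) true)
        none (some cc)
      else PySem.List.sorted (PySem.Dict.counter K).items (fun kv => kv.2) true) with hch
    have hnd : (chosen.map (fun kv => kv.1)).Nodup := by
      by_cases hcc : cc ≥ 0
      · rw [hch, if_pos hcc, PySem.List.slice_to _ (by omega)]
        exact pv_cts_nodup K cc.toNat
      · rw [hch, if_neg hcc]
        have h1 := pv_cts_nodup K (PySem.List.sorted (PySem.Dict.counter K).items
          (fun kv => kv.2) true).length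
        rwa [List.take_length] at h1
    refine Prod.ext rfl ?_
    simp only []
    apply List.map_congr_left
    intro doc _
    exact (pv_doc_eq (chosen.map (fun kv => kv.1)) hnd doc).symm

-- ===== VERDICT (by name: the statement is the Claim_ definition above) =====
theorem make_text_clusters_spec : Claim_equal_make_text_clusters := by
  intro docs cc _
  unfold Spec_make_text_clusters
  exact pv_main docs cc
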